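-- pv_equiv track=rewrite | github.com/JohnFu11er/Code_Challenge_Data | Week 27/Hard.py | aliquot_lists
-- ===== SOURCE A (Python) =====
-- def aliquot_lists(user_low: int, user_high: int):
--     ''' Returns three lists of numbers according
--     to their status as an aliquot number
--
--     - Perfect: sum of factors = number
--     - Abundant: sum of factors > number
--     - Deficient: sum of factors < number
--     '''
--
--     data = [aliquot_determination(i) for i in range(user_low, user_high + 1)]
--     perfect_list = [i[0] for i in data if i[1] == "perfect"]
--     abundant_list = [i[0] for i in data if i[1] == "abundant"]
--     deficient_list = [i[0] for i in data if i[1] == "deficient"]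
--
--     return [
--         f'Perfect Numbers {perfect_list}',
--         f'Abundant Numbers {abundant_list}',
--         f'Deficient Numbers {deficient_list}'
--     ]
--
-- def is_factor(num, divisor):
--     ''' Returns bool for given divisor
--
--     - True: is a factor
--     - False: not a factor
--     '''
--
--     if num % divisor == 0:
--         return True
--     return False
--
-- def aliquot_determination(num: int):
--     ''' Returns number given as argument
--     and the determination of its aliquot
--     number status
--
--     - Perfect: sum of factors = number
--     - Abundant: sum of factors > number
--     - Deficient: sum of factors < number
--     '''
--
--     divisors = list()
--     factors = [divisor for divisor in range(1,num) if is_factor(num,divisor)]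
--     factors_sum = sum(factors)
--     if factors_sum < num:
--         aliquot = "deficient"
--     elif factors_sum > num:
--         aliquot = "abundant"
--     else:
--         aliquot = "perfect"
--
--     return [num, aliquot]
-- ===== SOURCE B (Python) =====
-- def aliquot_lists(user_low: int, user_high: int):
--     '''Classify each n in [user_low, user_high] as perfect/abundant/deficient
--     by its proper-divisor sum.  Divisor sums for the whole range are built by
--     a single sieve over trial divisors d <= sqrt(user_high): each multiple
--     n = m*d in range receives d and its cofactor m, so no per-number divisor
--     scan is needed; the three lists are then built in one partitioning pass.'''
--     low = user_low
--     high = user_high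
--     width = high - low + 1
--     sums = [0] * width
--     lo = low if low > 1 else 1
--     d = 1
--     while d * d <= high:
--         start = d * d if d * d > lo else lo
--         m0 = -(-start // d)
--         for m in range(m0, high // d + 1):
--             i = m * d - low
--             sums[i] += d + (m if m != d else 0)
--         d += 1
--     perfect_list = []
--     abundant_list = []
--     deficient_list = []
--     for n in range(low, high + 1):
--         s = sums[n - low] - n if n >= 1 else 0
--         if s < n:
--             deficient_list.append(n)
--         elif s > n:
--             abundant_list.append(n)
--         else:
--             perfect_list.append(n)
--     return [
--         f'Perfect Numbers {perfect_list}',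
--         f'Abundant Numbers {abundant_list}',
--         f'Deficient Numbers {deficient_list}',
--     ]
-- ===== Notes on version B (the rewrite author's own statement) =====
-- stated objective: alternative
-- what changed: Replaces A's per-number trial division over range(1, n) with a single divisor sieve over the whole range (every trial divisor d with d*d <= high credits d and its cofactor to each of its multiples), and builds the three classification lists in one partitioning pass instead of a map plus three filter passes.
import Mathlib
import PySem

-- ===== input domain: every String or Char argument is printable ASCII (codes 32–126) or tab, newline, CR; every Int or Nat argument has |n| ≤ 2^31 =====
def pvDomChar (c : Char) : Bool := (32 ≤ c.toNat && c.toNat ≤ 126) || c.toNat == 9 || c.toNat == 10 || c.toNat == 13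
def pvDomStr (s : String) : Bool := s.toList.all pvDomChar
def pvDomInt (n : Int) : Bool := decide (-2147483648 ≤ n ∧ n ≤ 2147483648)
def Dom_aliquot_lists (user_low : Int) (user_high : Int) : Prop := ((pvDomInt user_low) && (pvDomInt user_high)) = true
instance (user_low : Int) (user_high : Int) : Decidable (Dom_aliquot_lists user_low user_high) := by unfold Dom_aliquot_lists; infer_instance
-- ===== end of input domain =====

-- B replaces A's per-number trial division over range(1, n) by one divisor sieve over the
-- whole range (each trial divisor d with d*d ≤ high credits d and its cofactor to every
-- multiple), and builds the three lists in one partitioning pass; objective: alternative.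

-- shared formatting helper: Python's f'... {list_of_ints}' tail, i.e. repr of a list of ints
def pvFmt (xs : List Int) : String :=
  "[" ++ PySem.Str.join ", " (xs.map PySem.Int.toStr) ++ "]"

-- ===== PORT A =====
def pvIsFactor (num : Int) (divisor : Int) : Bool :=
  if PySem.Int.mod num divisor == 0 then true else false

-- (A's local variable 'divisors = list()' is dead code and has no Lean counterpart)
def pvAliquotDetermination (num : Int) : Int × String :=
  let factors := (PySem.List.pyRange 1 num 1).filter (fun d => pvIsFactor num d)
  let factors_sum := factors.sum
  let aliquot := if factors_sum < num then "deficient"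
                 else if factors_sum > num then "abundant"
                 else "perfect"
  (num, aliquot)

def aliquot_lists (user_low : Int) (user_high : Int) : List String :=
  let data := (PySem.List.pyRange user_low (user_high + 1) 1).map pvAliquotDetermination
  let perfect_list := (data.filter (fun i => i.2 == "perfect")).map (fun i => i.1)
  let abundant_list := (data.filter (fun i => i.2 == "abundant")).map (fun i => i.1)
  let deficient_list := (data.filter (fun i => i.2 == "deficient")).map (fun i => i.1)
  [ "Perfect Numbers " ++ pvFmt perfect_list,
    "Abundant Numbers " ++ pvFmt abundant_list,
    "Deficient Numbers " ++ pvFmt deficient_list ]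

-- ===== PORT B =====
-- body of Source B's inner for-loop: sums[i] += d + (m if m != d else 0);
-- i = m*d - low is ≥ 0 whenever the loop reaches it (m*d ≥ start ≥ low), so .toNat is exact
def pvSieveBody (low d : Int) (a : List Int) (m : Int) : List Int :=
  let i := (m * d - low).toNat
  a.set i (a.getD i 0 + (d + (if m ≠ d then m else 0)))

-- Source B's while-loop over trial divisors d with d*d ≤ high
def pvSieveLoop (low high lo : Int) (d : Int) (a : List Int) : List Int :=
  if h : d * d ≤ high then
    let start := if d * d > lo then d * d else lo
    let m0 := -(PySem.Int.floordiv (-start) d)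
    pvSieveLoop low high lo (d + 1)
      ((PySem.List.pyRange m0 (PySem.Int.floordiv high d + 1) 1).foldl (pvSieveBody low d) a)
  else a
termination_by (high + 1 - d).toNat
decreasing_by
  have h0 : 0 ≤ high := le_trans (mul_self_nonneg d) h
  have hd : d ≤ high := by
    rcases le_or_gt d 0 with h1 | h1
    · omega
    · nlinarith
  omega

def aliquot_lists_alt (user_low : Int) (user_high : Int) : List String :=
  let width := user_high - user_low + 1
  let sums0 := List.replicate width.toNat (0 : Int)   -- [0] * width ([] when width ≤ 0)
  let lo := if user_low > 1 then user_low else 1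
  let sums := pvSieveLoop user_low user_high lo 1 sums0
  -- sums[n - user_low] is read only for n ≥ 1, n ≥ user_low, so the index is ≥ 0 and .toNat is exact
  let r := (PySem.List.pyRange user_low (user_high + 1) 1).foldl
    (fun (acc : List Int × List Int × List Int) (n : Int) =>
      let s := if n ≥ 1 then sums.getD (n - user_low).toNat 0 - n else 0
      if s < n then (acc.1, acc.2.1, acc.2.2 ++ [n])
      else if s > n then (acc.1, acc.2.1 ++ [n], acc.2.2)
      else (acc.1 ++ [n], acc.2.1, acc.2.2))
    ([], [], [])
  [ "Perfect Numbers " ++ pvFmt r.1,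
    "Abundant Numbers " ++ pvFmt r.2.1,
    "Deficient Numbers " ++ pvFmt r.2.2 ]

-- ===== PRECONDITION & SPEC =====
def Spec_aliquot_lists (user_low : Int) (user_high : Int) (out : List String) : Prop := out = aliquot_lists_alt user_low user_high
instance (user_low : Int) (user_high : Int) (out : List String) : Decidable (Spec_aliquot_lists user_low user_high out) := by unfold Spec_aliquot_lists; infer_instance

-- ===== CLAIM (what is proved, stated in full; the proofs are below) =====
def Claim_equal_aliquot_lists : Prop := ∀ (user_low : Int) (user_high : Int), Dom_aliquot_lists user_low user_high → Spec_aliquot_lists user_low user_high (aliquot_lists user_low user_high)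

-- ===== LEMMAS AND PROOFS =====

-- A's factors_sum for one number
def pvASumF (n : Int) : Int :=
  ((PySem.List.pyRange 1 n 1).filter (fun d => pvIsFactor n d)).sum

-- what the sieve adds to σ(m) at trial divisor j (Nat form)
def pvB (m j : Nat) : Nat :=
  if m % j = 0 then j + (if m / j ≠ j then m / j else 0) else 0

-- what round j of the sieve contributes to index n (Int form)
def pvC (n j : Int) : Int :=
  if j ∣ n ∧ j * j ≤ n then j + (if n / j ≠ j then n / j else 0) else 0

-- the paired contributions over 1 ≤ j ≤ √m add up to the full divisor sum
theorem pvPairing_sum (m : Nat) (hm : 1 ≤ m) :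
    (∑ j ∈ Finset.Icc 1 (Nat.sqrt m), pvB m j) = ∑ d ∈ m.divisors, d := by
  have hm0 : m ≠ 0 := by omega
  have hsplit : ∀ j ∈ Finset.Icc 1 (Nat.sqrt m), pvB m j =
      (if j ∣ m then j else 0) + (if j ∣ m ∧ m / j ≠ j then m / j else 0) := by
    intro j hj
    simp only [Finset.mem_Icc] at hj
    have : m % j = 0 ↔ j ∣ m := Nat.dvd_iff_mod_eq_zero.symm
    simp only [pvB]
    split_ifs <;> omega
  rw [Finset.sum_congr rfl hsplit, Finset.sum_add_distrib]
  have e1 : (∑ j ∈ Finset.Icc 1 (Nat.sqrt m), if j ∣ m then j else 0)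
      = ∑ d ∈ m.divisors.filter (fun d => d * d ≤ m), d := by
    rw [← Finset.sum_filter]
    apply Finset.sum_congr _ (fun _ _ => rfl)
    ext j
    simp only [Finset.mem_filter, Finset.mem_Icc, Nat.mem_divisors]
    constructor
    · rintro ⟨⟨h1, h2⟩, h3⟩
      exact ⟨⟨h3, hm0⟩, Nat.le_sqrt.mp h2⟩
    · rintro ⟨⟨h1, _⟩, h2⟩
      exact ⟨⟨Nat.pos_of_dvd_of_pos h1 hm, Nat.le_sqrt.mpr h2⟩, h1⟩
  have e2 : (∑ j ∈ Finset.Icc 1 (Nat.sqrt m), if j ∣ m ∧ m / j ≠ j then m / j else 0)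
      = ∑ d ∈ m.divisors.filter (fun d => ¬ d * d ≤ m), d := by
    rw [← Finset.sum_filter]
    apply Finset.sum_nbij' (fun j => m / j) (fun e => m / e)
    · intro j hj
      simp only [Finset.mem_filter, Finset.mem_Icc, Nat.mem_divisors] at hj ⊢
      obtain ⟨⟨hj1, hjs⟩, hjd, hne⟩ := hj
      have hmul : j * (m / j) = m := Nat.mul_div_cancel' hjd
      have hq1 : 1 ≤ m / j := by
        rcases Nat.eq_zero_or_pos (m / j) with h0 | h0
        · rw [h0, Nat.mul_zero] at hmul; omega
        · omega
      have hlt : j < m / j := by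
        have hjj : j * j ≤ m := Nat.le_sqrt.mp hjs
        rcases Nat.lt_or_ge j (m / j) with h | h
        · exact h
        · exfalso
          rcases Nat.eq_or_lt_of_le h with h | h
          · exact hne h
          · nlinarith
      refine ⟨⟨Nat.div_dvd_of_dvd hjd, hm0⟩, ?_⟩
      nlinarith
    · intro e he
      simp only [Finset.mem_filter, Finset.mem_Icc, Nat.mem_divisors] at he ⊢
      obtain ⟨⟨hed, _⟩, hbig⟩ := he
      have he1 : 1 ≤ e := Nat.pos_of_dvd_of_pos hed hm
      have hmul : e * (m / e) = m := Nat.mul_div_cancel' hed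
      have hq1 : 1 ≤ m / e := by
        rcases Nat.eq_zero_or_pos (m / e) with h0 | h0
        · rw [h0, Nat.mul_zero] at hmul; omega
        · omega
      have hlt : m / e < e := by nlinarith
      refine ⟨⟨hq1, Nat.le_sqrt.mpr (by nlinarith)⟩, Nat.div_dvd_of_dvd hed, ?_⟩
      rw [Nat.div_div_self hed hm0]
      omega
    · intro j hj
      simp only [Finset.mem_filter, Finset.mem_Icc] at hj
      exact Nat.div_div_self hj.2.1 hm0
    · intro e he
      simp only [Finset.mem_filter, Nat.mem_divisors] at he
      exact Nat.div_div_self he.1.1 hm0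
    · intro j hj
      rfl
  rw [e1, e2]
  exact Finset.sum_filter_add_sum_filter_not m.divisors (fun d => d * d ≤ m) (fun d => d)

-- A's trial-division sum over range(1, m) is the proper-divisor sum
theorem pvASum_eq_proper (m : Nat) (hm : 1 ≤ m) :
    pvASumF (m : Int) = ((∑ d ∈ m.properDivisors, d : Nat) : Int) := by
  rw [pvASumF, PySem.List.pyRange_one]
  have hN : ((m : Int) - 1).toNat = m - 1 := by omega
  rw [hN]
  have hfil : ∀ (l : List Int) (p : Int → Bool), (l.filter p).sum = (l.map (fun x => if p x then x else 0)).sum := by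
    intro l p
    induction l with
    | nil => rfl
    | cons a t ih => by_cases h : p a <;> simp [h, ih]
  rw [hfil, List.map_map]
  have hgen : ∀ (N : Nat) (g : Nat → Int), ((List.range N).map g).sum = ∑ i ∈ Finset.range N, g i :=
    fun _ _ => rfl
  rw [hgen]
  simp only [Function.comp]
  have hfac : ∀ k : Nat, pvIsFactor (m:Int) (1 + (k:Int)) = decide ((1+k) ∣ m) := by
    intro k
    simp only [pvIsFactor, beq_iff_eq]
    have : PySem.Int.mod (m:Int) (1 + (k:Int)) = 0 ↔ ((1:Int) + k) ∣ (m:Int) :=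
      PySem.Int.mod_eq_zero_iff_dvd _ _
    have h2 : ((1:Int) + k) ∣ (m:Int) ↔ (1+k) ∣ m := by
      rw [show ((1:Int) + k) = ((1+k : Nat) : Int) by push_cast; ring]
      exact Int.natCast_dvd_natCast
    by_cases h : (1+k) ∣ m <;> simp [h, this, h2]
  have hR : ((∑ d ∈ m.properDivisors, d : Nat) : Int)
      = ∑ k ∈ Finset.range (m-1), (if (1+k) ∣ m then ((1+k : Nat) : Int) else 0) := by
    rw [show m.properDivisors = Finset.filter (· ∣ m) (Finset.Ico 1 m) from rfl]
    rw [Finset.sum_filter, Finset.sum_Ico_eq_sum_range]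
    push_cast
    apply Finset.sum_congr rfl
    intro k _
    split_ifs <;> simp
  rw [hR]
  apply Finset.sum_congr rfl
  intro k _
  rw [hfac]
  by_cases h : (1+k) ∣ m <;> simp [h]

-- the Int-indexed contribution sum is the Nat divisor sum
theorem pvCsum (n high : Int) (h1 : 1 ≤ n) (hnh : n ≤ high) :
    ∑ j ∈ Finset.Ico (1 : Int) (high + 1), pvC n j
      = ((∑ t ∈ n.toNat.divisors, t : Nat) : Int) := by
  set m := n.toNat with hmdef
  have hn : n = (m : Int) := by omega
  have hm1 : 1 ≤ m := by omega
  rw [← pvPairing_sum m hm1, Nat.cast_sum]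
  have hB : ∀ t, ((pvB m t : Nat) : Int)
      = if m % t = 0 then ((t : Int) + (if m / t ≠ t then ((m / t : Nat) : Int) else 0)) else 0 := by
    intro t
    rw [pvB]
    split_ifs <;> push_cast <;> simp
  rw [Finset.sum_congr rfl (fun t _ => hB t)]
  simp only [pvC]
  rw [← Finset.sum_filter, ← Finset.sum_filter]
  apply Finset.sum_nbij' (i := fun (j : Int) => j.toNat) (j := fun (t : Nat) => (t : Int))
  · intro j hj
    obtain ⟨t, rfl⟩ : ∃ t : Nat, j = (t : Int) := ⟨j.toNat, by
      simp only [Finset.mem_filter, Finset.mem_Ico] at hj; omega⟩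
    simp only [Finset.mem_filter, Finset.mem_Ico, Finset.mem_Icc, Int.toNat_natCast] at hj ⊢
    obtain ⟨⟨hj1, hjh⟩, hjd, hjs⟩ := hj
    have htd : t ∣ m := by rwa [hn, Int.natCast_dvd_natCast] at hjd
    have hsq : t * t ≤ m := by
      rw [hn] at hjs
      exact_mod_cast hjs
    exact ⟨⟨by omega, Nat.le_sqrt.mpr hsq⟩, Nat.dvd_iff_mod_eq_zero.mp htd⟩
  · intro t ht
    simp only [Finset.mem_filter, Finset.mem_Ico, Finset.mem_Icc] at ht ⊢
    obtain ⟨⟨ht1, hts⟩, htm⟩ := ht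
    have htd : t ∣ m := Nat.dvd_iff_mod_eq_zero.mpr htm
    have hsq : t * t ≤ m := Nat.le_sqrt.mp hts
    have htt : t ≤ t * t := Nat.le_mul_of_pos_left t (by omega)
    refine ⟨⟨by omega, ?_⟩, ?_, ?_⟩
    · have : (t : Int) ≤ (m : Int) := by exact_mod_cast le_trans htt hsq
      omega
    · rw [hn]
      exact_mod_cast Int.natCast_dvd_natCast.mpr htd
    · rw [hn]
      exact_mod_cast hsq
  · intro j hj
    simp only [Finset.mem_filter, Finset.mem_Ico] at hj
    omega
  · intro t ht
    simp [Int.toNat_natCast]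
  · intro j hj
    obtain ⟨t, rfl⟩ : ∃ t : Nat, j = (t : Int) := ⟨j.toNat, by
      simp only [Finset.mem_filter, Finset.mem_Ico] at hj; omega⟩
    simp only [Int.toNat_natCast]
    rw [hn, ← Int.natCast_ediv]
    by_cases hc : m / t = t
    · rw [if_neg (by simp [hc]), if_neg (by simp [hc])]
    · rw [if_pos (fun hx => hc (by exact_mod_cast hx)), if_pos hc]

theorem pvSieveBody_length (low d : Int) (a : List Int) (m : Int) :
    (pvSieveBody low d a m).length = a.length := by
  simp [pvSieveBody]

theorem pvInner_length (low d : Int) (ms : List Int) (a : List Int) :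
    (ms.foldl (pvSieveBody low d) a).length = a.length := by
  induction ms generalizing a with
  | nil => rfl
  | cons m t ih => rw [List.foldl_cons, ih, pvSieveBody_length]

-- reading index n - low after the inner loop: only the (at most one) multiple equal to n contributes
theorem pvInner_get (low d n : Int) (_hd : 1 ≤ d) (hn : low ≤ n)
    (ms : List Int) (a : List Int) (hms : ∀ m ∈ ms, low ≤ m * d)
    (hb : (n - low).toNat < a.length) :
    (ms.foldl (pvSieveBody low d) a).getD (n - low).toNat 0
      = a.getD (n - low).toNat 0 +
        ((ms.filter (fun m => m * d == n)).map (fun m => d + (if m ≠ d then m else 0))).sum := by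
  induction ms generalizing a with
  | nil => simp
  | cons m t ih =>
    have hm : low ≤ m * d := hms m List.mem_cons_self
    rw [List.foldl_cons, List.filter_cons]
    have hlen' : (pvSieveBody low d a m).length = a.length := pvSieveBody_length low d a m
    by_cases hc : m * d = n
    · have hidx : (m * d - low).toNat = (n - low).toNat := by omega
      have hset : (pvSieveBody low d a m).getD (n - low).toNat 0
          = a.getD (n - low).toNat 0 + (d + (if m ≠ d then m else 0)) := by
        simp only [pvSieveBody, hidx]
        rw [List.getD_eq_getElem?_getD, List.getElem?_set_self (by omega)]
        rfl
      rw [ih (pvSieveBody low d a m) (fun x hx => hms x (List.mem_cons_of_mem m hx)) (by omega),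
          hset]
      have : (m * d == n) = true := by simp [hc]
      rw [this]
      simp only [if_true, List.map_cons, List.sum_cons]
      ring
    · have hidx : (m * d - low).toNat ≠ (n - low).toNat := by omega
      have hset : (pvSieveBody low d a m).getD (n - low).toNat 0
          = a.getD (n - low).toNat 0 := by
        simp only [pvSieveBody]
        rw [List.getD_eq_getElem?_getD, List.getElem?_set_ne (by omega),
            ← List.getD_eq_getElem?_getD]
      rw [ih (pvSieveBody low d a m) (fun x hx => hms x (List.mem_cons_of_mem m hx)) (by omega),
          hset]
      have : (m * d == n) = false := by simp [hc]
      rw [this]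
      simp

-- the filtered multiples list is the singleton cofactor (or empty)
theorem pvFilter_singleton (b x : Int) : ∀ (k : Nat) (a : Int), (b - a).toNat = k →
    (PySem.List.pyRange a b 1).filter (fun y => y == x)
      = if a ≤ x ∧ x < b then [x] else [] := by
  intro k
  induction k with
  | zero =>
    intro a hk
    rw [PySem.List.pyRange_one_eq_nil (by omega), if_neg (by omega)]
    rfl
  | succ k ih =>
    intro a hk
    rw [PySem.List.pyRange_one_cons (by omega), List.filter_cons, ih (a+1) (by omega)]
    have hab : a < b := by omega
    by_cases hax : a = x
    · subst hax
      simp only [beq_self_eq_true, if_true]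
      rw [if_neg (show ¬ (a + 1 ≤ a ∧ a < b) from by omega), if_pos ⟨le_refl a, hab⟩]
    · have hbe : (a == x) = false := by simp [hax]
      rw [hbe]
      simp only [Bool.false_eq_true, if_false]
      have hiff : (a + 1 ≤ x ∧ x < b) ↔ (a ≤ x ∧ x < b) :=
        ⟨fun h2 => ⟨by omega, h2.2⟩, fun h2 => ⟨by omega, h2.2⟩⟩
      simp only [hiff]

theorem pvFilterRange (d n m0 M : Int) (hd : 1 ≤ d) :
    (PySem.List.pyRange m0 M 1).filter (fun m => m * d == n)
      = if d ∣ n ∧ m0 ≤ n / d ∧ n / d < M then [n / d] else [] := by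
  by_cases hdvd : d ∣ n
  · have hp : (fun m => m * d == n) = (fun m => m == n / d) := by
      funext m
      by_cases hmx : m = n / d
      · subst hmx
        simp [Int.ediv_mul_cancel hdvd]
      · have hne : ¬ m * d = n := fun hc => hmx (by
          rw [← hc, Int.mul_ediv_cancel _ (by omega : d ≠ 0)])
        simp [hmx, hne]
    rw [hp, pvFilter_singleton M (n / d) (M - m0).toNat m0 rfl]
    by_cases hcond : m0 ≤ n / d ∧ n / d < M
    · rw [if_pos hcond, if_pos ⟨hdvd, hcond⟩]
    · rw [if_neg hcond, if_neg (by tauto)]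
  · rw [if_neg (by tauto)]
    apply List.filter_eq_nil_iff.mpr
    intro m _
    simp only [beq_iff_eq]
    intro hc
    exact hdvd ⟨m, by rw [← hc, mul_comm]⟩

-- the outer loop accumulates one pvC contribution per remaining trial divisor
theorem pvSieve_get (low high lo n : Int)
    (hlo : lo = if low > 1 then low else 1)
    (h1 : 1 ≤ n) (hln : low ≤ n) (hnh : n ≤ high) :
    ∀ (k : Nat) (d : Int) (a : List Int), (high + 1 - d).toNat = k →
    1 ≤ d → a.length = (high - low + 1).toNat →
    (pvSieveLoop low high lo d a).getD (n - low).toNat 0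
      = a.getD (n - low).toNat 0 + ∑ j ∈ Finset.Ico d (high + 1), pvC n j := by
  have hstop : ∀ (d : Int) (a : List Int), 1 ≤ d → ¬ d * d ≤ high →
      (pvSieveLoop low high lo d a).getD (n - low).toNat 0
        = a.getD (n - low).toNat 0 + ∑ j ∈ Finset.Ico d (high + 1), pvC n j := by
    intro d a hd1 h
    rw [pvSieveLoop, dif_neg h]
    have hzero : ∑ j ∈ Finset.Ico d (high + 1), pvC n j = 0 := by
      apply Finset.sum_eq_zero
      intro j hj
      rw [Finset.mem_Ico] at hj
      rw [pvC, if_neg]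
      rintro ⟨-, hsq⟩
      have : d * d ≤ j * j := by nlinarith
      omega
    rw [hzero, add_zero]
  intro k
  induction k with
  | zero =>
    intro d a hk hd1 hlen
    exact hstop d a hd1 (by
      have h2 : high + 1 ≤ d := by omega
      nlinarith)
  | succ k ih =>
    intro d a hk hd1 hlen
    by_cases h : d * d ≤ high
    · have hd0 : (0:Int) < d := by omega
      have hdh : d ≤ high := by nlinarith
      have hnlo : lo ≤ n := by rw [hlo]; split_ifs <;> omega
      rw [pvSieveLoop, dif_pos h]
      simp only []
      set start := if d * d > lo then d * d else lo with hstart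
      set m0 := -(PySem.Int.floordiv (-start) d) with hm0def
      set M := PySem.Int.floordiv high d + 1 with hM
      have hstart_lo : lo ≤ start := by rw [hstart]; split_ifs <;> omega
      have hlow_lo : low ≤ lo := by rw [hlo]; split_ifs <;> omega
      have hfd : PySem.Int.floordiv (-start) d = (-start) / d :=
        PySem.Int.floordiv_eq_ediv_of_pos hd0
      have hfh : PySem.Int.floordiv high d = high / d :=
        PySem.Int.floordiv_eq_ediv_of_pos hd0
      have hm0start : start ≤ m0 * d := by
        have := Int.ediv_mul_le (-start) (show d ≠ 0 by omega)
        rw [hm0def, hfd]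
        nlinarith [this]
      have hms : ∀ m ∈ PySem.List.pyRange m0 M 1, low ≤ m * d := by
        intro m hmem
        rw [PySem.List.mem_pyRange_one] at hmem
        have : m0 * d ≤ m * d := mul_le_mul_of_nonneg_right hmem.1 (by omega)
        omega
      have hb : (n - low).toNat < a.length := by rw [hlen]; omega
      rw [ih (d+1) _ (by omega) (by omega) (by rw [pvInner_length]; exact hlen)]
      rw [pvInner_get low d n hd1 hln _ a hms hb]
      rw [pvFilterRange d n m0 M hd1]
      have hcond : (d ∣ n ∧ m0 ≤ n / d ∧ n / d < M) ↔ (d ∣ n ∧ d * d ≤ n) := by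
        constructor
        · rintro ⟨hdvd, hle, -⟩
          refine ⟨hdvd, ?_⟩
          have hk2 : n / d * d = n := Int.ediv_mul_cancel hdvd
          have : m0 * d ≤ n / d * d := mul_le_mul_of_nonneg_right hle (by omega)
          have hsn : start ≤ n := by omega
          rw [hstart] at hsn
          split_ifs at hsn <;> omega
        · rintro ⟨hdvd, hsq⟩
          have hk2 : n / d * d = n := Int.ediv_mul_cancel hdvd
          refine ⟨hdvd, ?_, ?_⟩
          · have hsn : start ≤ n := by rw [hstart]; split_ifs <;> omega
            have h2 : -(n / d) ≤ (-start) / d := by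
              rw [Int.le_ediv_iff_mul_le hd0]
              nlinarith
            rw [hm0def, hfd]
            omega
          · have := Int.ediv_le_ediv hd0 hnh
            rw [hM, hfh]
            omega
      have hpvc : ((if d ∣ n ∧ m0 ≤ n / d ∧ n / d < M then [n / d] else []).map
            (fun m => d + (if m ≠ d then m else 0))).sum = pvC n d := by
        by_cases hc : d ∣ n ∧ d * d ≤ n
        · rw [if_pos (hcond.mpr hc), pvC, if_pos hc]
          simp
        · rw [if_neg (fun hx => hc (hcond.mp hx)), pvC, if_neg hc]
          rfl
      rw [hpvc]
      rw [Finset.Ico_eq_cons_Ioo (show d < high + 1 by omega), Finset.sum_cons,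
          ← Finset.Ico_add_one_left_eq_Ioo]
      ring
    · exact hstop d a hd1 h

-- the sieve value read in B's final loop equals A's factors_sum, for every n in the range
theorem pvSVal (low high n : Int) (hln : low ≤ n) (hnh : n ≤ high) :
    (if n ≥ 1 then
       (pvSieveLoop low high (if low > 1 then low else 1) 1
          (List.replicate (high - low + 1).toNat (0 : Int))).getD (n - low).toNat 0 - n
     else 0) = pvASumF n := by
  by_cases h1 : n ≥ 1
  · rw [if_pos h1]
    have hget := pvSieve_get low high (if low > 1 then low else 1) n rfl h1 hln hnh
      (high + 1 - 1).toNat 1 (List.replicate (high - low + 1).toNat (0 : Int)) rfl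
      (le_refl 1) (by simp)
    have hrep : (List.replicate (high - low + 1).toNat (0 : Int)).getD (n - low).toNat 0 = 0 := by
      rw [List.getD_eq_getElem?_getD, List.getElem?_replicate]
      split_ifs <;> rfl
    rw [hget, hrep, zero_add, pvCsum n high h1 hnh]
    have hcast : ((n.toNat : Nat) : Int) = n := by omega
    have hproper := pvASum_eq_proper n.toNat (by omega)
    rw [hcast] at hproper
    rw [hproper, Nat.sum_divisors_eq_sum_properDivisors_add_self]
    push_cast
    omega
  · rw [if_neg h1, pvASumF, PySem.List.pyRange_one_eq_nil (by omega)]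
    rfl

-- B's single partitioning pass, characterised by three filters
theorem pvFoldB (sf : Int → Int) (l : List Int) (P A D : List Int) :
    l.foldl
      (fun (acc : List Int × List Int × List Int) (n : Int) =>
        if sf n < n then (acc.1, acc.2.1, acc.2.2 ++ [n])
        else if sf n > n then (acc.1, acc.2.1 ++ [n], acc.2.2)
        else (acc.1 ++ [n], acc.2.1, acc.2.2))
      (P, A, D)
    = (P ++ l.filter (fun n => decide (¬ sf n < n ∧ ¬ sf n > n)),
       A ++ l.filter (fun n => decide (¬ sf n < n ∧ sf n > n)),
       D ++ l.filter (fun n => decide (sf n < n))) := by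
  induction l generalizing P A D with
  | nil => simp
  | cons a t ih =>
    simp only [List.foldl_cons, List.filter_cons]
    by_cases h1 : sf a < a
    · simp [h1, ih]
    · by_cases h2 : sf a > a <;> simp [h1, h2, ih]

-- A's map-then-filter lists, re-expressed as filters of the range
theorem pvAList (l : List Int) (c : String) :
    ((l.map pvAliquotDetermination).filter (fun i => i.2 == c)).map (fun i => i.1)
      = l.filter (fun n => (pvAliquotDetermination n).2 == c) := by
  rw [List.filter_map, List.map_map]
  have : ((fun (i : Int × String) => i.1) ∘ pvAliquotDetermination) = id := funext fun n => rfl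
  rw [this, List.map_id]
  rfl

theorem pvCls_perfect (n : Int) (sf : Int → Int) (h : sf n = pvASumF n) :
    ((pvAliquotDetermination n).2 == "perfect")
      = decide (¬ sf n < n ∧ ¬ sf n > n) := by
  have hdet : (pvAliquotDetermination n).2
      = (if pvASumF n < n then "deficient" else if pvASumF n > n then "abundant" else "perfect") := rfl
  rw [hdet, h]
  by_cases h1 : pvASumF n < n <;> by_cases h2 : pvASumF n > n <;> simp [h1, h2]

theorem pvCls_abundant (n : Int) (sf : Int → Int) (h : sf n = pvASumF n) :
    ((pvAliquotDetermination n).2 == "abundant")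
      = decide (¬ sf n < n ∧ sf n > n) := by
  have hdet : (pvAliquotDetermination n).2
      = (if pvASumF n < n then "deficient" else if pvASumF n > n then "abundant" else "perfect") := rfl
  rw [hdet, h]
  by_cases hx : pvASumF n < n <;> by_cases hy : pvASumF n > n <;> simp [hx, hy]

theorem pvCls_deficient (n : Int) (sf : Int → Int) (h : sf n = pvASumF n) :
    ((pvAliquotDetermination n).2 == "deficient")
      = decide (sf n < n) := by
  have hdet : (pvAliquotDetermination n).2
      = (if pvASumF n < n then "deficient" else if pvASumF n > n then "abundant" else "perfect") := rfl
  rw [hdet, h]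
  by_cases hx : pvASumF n < n <;> by_cases hy : pvASumF n > n <;> simp [hx, hy]

-- ===== VERDICT (by name: the statement is the Claim_ definition above) =====
theorem aliquot_lists_spec : Claim_equal_aliquot_lists := by
  intro user_low user_high _
  show aliquot_lists user_low user_high = aliquot_lists_alt user_low user_high
  simp only [aliquot_lists, aliquot_lists_alt, pvFoldB, pvAList, List.nil_append]
  have key : ∀ n ∈ PySem.List.pyRange user_low (user_high + 1) 1,
      (fun n => if n ≥ 1 then
        (pvSieveLoop user_low user_high (if user_low > 1 then user_low else 1) 1
          (List.replicate (user_high - user_low + 1).toNat (0 : Int))).getD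
            (n - user_low).toNat 0 - n
       else 0) n = pvASumF n := by
    intro n hn
    rw [PySem.List.mem_pyRange_one] at hn
    exact pvSVal user_low user_high n hn.1 (by omega)
  rw [List.filter_congr (fun n hn => pvCls_perfect n
        (fun k => if k ≥ 1 then
          (pvSieveLoop user_low user_high (if user_low > 1 then user_low else 1) 1
            (List.replicate (user_high - user_low + 1).toNat (0 : Int))).getD
              (k - user_low).toNat 0 - k
         else 0) (key n hn)),
      List.filter_congr (fun n hn => pvCls_abundant n
        (fun k => if k ≥ 1 then
          (pvSieveLoop user_low user_high (if user_low > 1 then user_low else 1) 1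
            (List.replicate (user_high - user_low + 1).toNat (0 : Int))).getD
              (k - user_low).toNat 0 - k
         else 0) (key n hn)),
      List.filter_congr (fun n hn => pvCls_deficient n
        (fun k => if k ≥ 1 then
          (pvSieveLoop user_low user_high (if user_low > 1 then user_low else 1) 1
            (List.replicate (user_high - user_low + 1).toNat (0 : Int))).getD
              (k - user_low).toNat 0 - k
         else 0) (key n hn))]
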